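-- pv_equiv track=rewrite | github.com/chandruthehacker/log-parser | detections/authlog_detection.py | authlog_detection
-- ===== SOURCE A (Python) =====
-- from collections import defaultdict
--
-- def authlog_detection(logs):
--     # Initialize result dictionary to store different types of alerts
--     result = {
--         "Brute-Force SSH Attack": [],
--         "Suspicious Login Times": [],
--         "Logins from New or Rare IPs": [],
--         "Multiple Failed Then Successful Login": [],
--         "Sudden Sudo Access": []
--     }
--
--     # Counters for tracking login attempts
--     brute_force_counter = defaultdict(int)
--     known_user_ips = defaultdict(set)
--     failed_before_success = defaultdict(int)
--
--     # Process each log entry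
--     for entry in logs:
--         ip = entry.get("source_ip")
--         user = entry.get("username")
--         status = entry.get("status")
--         timestamp = entry.get("timestamp")
--         event_type = entry.get("event_type")
--         command = entry.get("command")
--         if not ip or not user or not status:
--             # Sudden sudo access detection
--             if event_type == "sudo" and command:
--                 result["Sudden Sudo Access"].append(
--                     f"{user} ran sudo command '{command}' at {timestamp}"
--                 )
--             continue  # Skip incomplete logs
--
--
--
--         # Brute-force SSH detection
--         if status == "Failed":
--             brute_force_counter[ip] += 1
--             failed_before_success[ip] += 1
--             if brute_force_counter[ip] > 3:
--                 result["Brute-Force SSH Attack"].append(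
--                     f"{ip} failed to login {brute_force_counter[ip]} times (possible brute-force)"
--                 )
--
--         elif status == "Accepted":
--             # Suspicious login time detection (e.g., late-night logins)
--             hour = int(timestamp.split(" ")[1].split(":")[0])
--             if hour < 6 or hour > 23:
--                 result["Suspicious Login Times"].append(
--                     f"{user} logged in from {ip} at odd hour {hour}:00 ({timestamp})"
--                 )
--
--             # Logins from new or rare IP detection
--             if ip not in known_user_ips[user]:
--                 result["Logins from New or Rare IPs"].append(
--                     f"New IP {ip} used by {user} at {timestamp}"
--                 )
--                 known_user_ips[user].add(ip)
--
--             # Successful login after multiple failed attempts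
--             if failed_before_success[ip] >= 3:
--                 result["Multiple Failed Then Successful Login"].append(
--                     f"{ip} user {user} succeeded login after {failed_before_success[ip]} failures"
--                 )
--             failed_before_success[ip] = 0
--
--
--
--     return result
-- ===== SOURCE B (Python) =====
-- def authlog_detection(logs):
--     # Five independent scans, one per alert category, each with only its own state.
--     def complete(e):
--         return bool(e.get("source_ip")) and bool(e.get("username")) and bool(e.get("status"))
--
--     brute = []
--     count = {}
--     for e in logs:
--         if not complete(e):
--             continue
--         if e.get("status") == "Failed":
--             ip = e.get("source_ip")
--             count[ip] = count.get(ip, 0) + 1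
--             if count[ip] > 3:
--                 brute.append(f"{ip} failed to login {count[ip]} times (possible brute-force)")
--
--     susp = []
--     for e in logs:
--         if not complete(e):
--             continue
--         if e.get("status") == "Accepted":
--             hour = int(e.get("timestamp").split(" ")[1].split(":")[0])
--             if hour < 6 or hour > 23:
--                 susp.append(f"{e.get('username')} logged in from {e.get('source_ip')} at odd hour {hour}:00 ({e.get('timestamp')})")
--
--     new_ips = []
--     seen = {}
--     for e in logs:
--         if not complete(e):
--             continue
--         if e.get("status") == "Accepted":
--             user, ip = e.get("username"), e.get("source_ip")
--         else:
--             continue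
--         s = seen.setdefault(user, set())
--         if ip not in s:
--             new_ips.append(f"New IP {ip} used by {user} at {e.get('timestamp')}")
--             s.add(ip)
--
--     multi = []
--     fails = {}
--     for e in logs:
--         if not complete(e):
--             continue
--         ip = e.get("source_ip")
--         st = e.get("status")
--         if st == "Failed":
--             fails[ip] = fails.get(ip, 0) + 1
--         elif st == "Accepted":
--             if fails.get(ip, 0) >= 3:
--                 multi.append(f"{ip} user {e.get('username')} succeeded login after {fails.get(ip, 0)} failures")
--             fails[ip] = 0
--
--     sudo = []
--     for e in logs:
--         if not complete(e) and e.get("event_type") == "sudo" and e.get("command"):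
--             sudo.append(f"{e.get('username')} ran sudo command '{e.get('command')}' at {e.get('timestamp')}")
--
--     return {
--         "Brute-Force SSH Attack": brute,
--         "Suspicious Login Times": susp,
--         "Logins from New or Rare IPs": new_ips,
--         "Multiple Failed Then Successful Login": multi,
--         "Sudden Sudo Access": sudo,
--     }
-- ===== Notes on version B (the rewrite author's own statement) =====
-- stated objective: alternative
-- what changed: A's single pass with one shared mutable state (three counters plus a five-list result dict) is decomposed into five independent scans of the log list, one per alert category, each keeping only the state its category needs.
import Mathlib
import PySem

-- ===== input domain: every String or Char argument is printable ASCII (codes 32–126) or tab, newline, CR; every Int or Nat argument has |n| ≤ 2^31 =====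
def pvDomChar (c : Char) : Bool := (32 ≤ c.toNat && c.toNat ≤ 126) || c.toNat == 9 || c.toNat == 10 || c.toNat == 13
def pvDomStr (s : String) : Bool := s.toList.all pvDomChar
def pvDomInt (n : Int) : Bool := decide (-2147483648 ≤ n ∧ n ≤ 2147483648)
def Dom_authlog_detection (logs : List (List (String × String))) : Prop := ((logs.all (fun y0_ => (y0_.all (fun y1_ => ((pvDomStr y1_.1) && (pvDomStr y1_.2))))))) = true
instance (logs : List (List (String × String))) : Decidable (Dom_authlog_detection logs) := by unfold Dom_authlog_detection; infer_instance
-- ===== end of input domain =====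

-- B replaces A's single pass with shared mutable state by five independent scans, one per
-- alert category, each keeping only its own state; same return value on Pre_ (objective: alternative).

-- shared accessors / formatting helpers (both Pythons use identical .get calls and f-strings)
def pvGet (e : List (String × String)) (k : String) : Option String :=
  (PySem.Dict.mk e).get? k

def pvTruthy : Option String → Bool
  | some s => !(s == "")
  | none => false

def pvFmt (o : Option String) : String := o.getD "None"  -- f"{x}" on a possibly-None field

-- hour = int(timestamp.split(" ")[1].split(":")[0]); none where Python raises
def pvHour (ts : String) : Option Int :=
  match PySem.List.pyGet? ((PySem.Str.split? ts " ").getD []) 1 with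
  | none => none
  | some p =>
    match PySem.List.pyGet? ((PySem.Str.split? p ":").getD []) 0 with
    | none => none
    | some h => PySem.Int.ofStr? h

def pvMsgBF (ip : String) (c : Int) : String :=
  ip ++ " failed to login " ++ PySem.Int.toStr c ++ " times (possible brute-force)"
def pvMsgSusp (user ip : String) (h : Int) (ts : String) : String :=
  user ++ " logged in from " ++ ip ++ " at odd hour " ++ PySem.Int.toStr h ++ ":00 (" ++ ts ++ ")"
def pvMsgNew (ip user ts : String) : String :=
  "New IP " ++ ip ++ " used by " ++ user ++ " at " ++ ts
def pvMsgMFS (ip user : String) (f : Int) : String :=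
  ip ++ " user " ++ user ++ " succeeded login after " ++ PySem.Int.toStr f ++ " failures"
def pvMsgSudo (user cmd ts : String) : String :=
  user ++ " ran sudo command '" ++ cmd ++ "' at " ++ ts

-- ===== PORT A =====
-- A's loop state: three counters plus the five result lists of the result dict (fixed keys).
structure AuthStA where
  bf : PySem.Dict String Int
  known : PySem.Dict String (PySem.Set String)
  fbs : PySem.Dict String Int
  r1 : List String
  r2 : List String
  r3 : List String
  r4 : List String
  r5 : List String
deriving Repr, DecidableEq

-- one iteration of A's loop; hour uses getD 0 where Python raises (excluded by Pre_)
def authStepA (s : AuthStA) (e : List (String × String)) : AuthStA :=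
  let ip := pvGet e "source_ip"
  let user := pvGet e "username"
  let status := pvGet e "status"
  let timestamp := pvGet e "timestamp"
  if !pvTruthy ip || !pvTruthy user || !pvTruthy status then
    if pvGet e "event_type" == some "sudo" && pvTruthy (pvGet e "command") then
      { s with r5 := s.r5 ++ [pvMsgSudo (pvFmt user) ((pvGet e "command").getD "") (pvFmt timestamp)] }
    else s
  else if status == some "Failed" then
    let ipS := ip.getD ""
    let c := s.bf.getD ipS 0 + 1
    let f := s.fbs.getD ipS 0 + 1
    { s with bf := s.bf.insert ipS c, fbs := s.fbs.insert ipS f,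
             r1 := if c > 3 then s.r1 ++ [pvMsgBF ipS c] else s.r1 }
  else if status == some "Accepted" then
    let ipS := ip.getD ""
    let userS := user.getD ""
    let hour := (timestamp.bind pvHour).getD 0
    let ks := s.known.getD userS PySem.Set.empty
    let f := s.fbs.getD ipS 0
    { s with
      r2 := if hour < 6 || hour > 23 then s.r2 ++ [pvMsgSusp userS ipS hour (pvFmt timestamp)] else s.r2,
      r3 := if !PySem.Set.contains ks ipS then s.r3 ++ [pvMsgNew ipS userS (pvFmt timestamp)] else s.r3,
      known := if !PySem.Set.contains ks ipS then s.known.insert userS (PySem.Set.add ks ipS) else s.known,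
      r4 := if f ≥ 3 then s.r4 ++ [pvMsgMFS ipS userS f] else s.r4,
      fbs := s.fbs.insert ipS 0 }
  else s

def authlog_detection (logs : List (List (String × String))) : List (String × List String) :=
  let s := logs.foldl authStepA ⟨.empty, .empty, .empty, [], [], [], [], []⟩
  [("Brute-Force SSH Attack", s.r1),
   ("Suspicious Login Times", s.r2),
   ("Logins from New or Rare IPs", s.r3),
   ("Multiple Failed Then Successful Login", s.r4),
   ("Sudden Sudo Access", s.r5)]

-- ===== PORT B =====  (five independent scans, each with only its own state)
def passBF (bf : PySem.Dict String Int) : List (List (String × String)) → List String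
  | [] => []
  | e :: rest =>
    let ip := pvGet e "source_ip"
    let user := pvGet e "username"
    let status := pvGet e "status"
    if !pvTruthy ip || !pvTruthy user || !pvTruthy status then passBF bf rest
    else if status == some "Failed" then
      let ipS := ip.getD ""
      let c := bf.getD ipS 0 + 1
      (if c > 3 then [pvMsgBF ipS c] else []) ++ passBF (bf.insert ipS c) rest
    else passBF bf rest

def passSusp : List (List (String × String)) → List String
  | [] => []
  | e :: rest =>
    let ip := pvGet e "source_ip"
    let user := pvGet e "username"
    let status := pvGet e "status"
    if !pvTruthy ip || !pvTruthy user || !pvTruthy status then passSusp rest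
    else if status == some "Accepted" then
      let timestamp := pvGet e "timestamp"
      let hour := (timestamp.bind pvHour).getD 0
      (if hour < 6 || hour > 23
       then [pvMsgSusp (user.getD "") (ip.getD "") hour (pvFmt timestamp)] else []) ++ passSusp rest
    else passSusp rest

def passNew (known : PySem.Dict String (PySem.Set String)) :
    List (List (String × String)) → List String
  | [] => []
  | e :: rest =>
    let ip := pvGet e "source_ip"
    let user := pvGet e "username"
    let status := pvGet e "status"
    if !pvTruthy ip || !pvTruthy user || !pvTruthy status then passNew known rest
    else if status == some "Accepted" then
      let ipS := ip.getD ""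
      let userS := user.getD ""
      let ks := known.getD userS PySem.Set.empty
      if !PySem.Set.contains ks ipS then
        pvMsgNew ipS userS (pvFmt (pvGet e "timestamp")) ::
          passNew (known.insert userS (PySem.Set.add ks ipS)) rest
      else passNew known rest
    else passNew known rest

def passMFS (fbs : PySem.Dict String Int) : List (List (String × String)) → List String
  | [] => []
  | e :: rest =>
    let ip := pvGet e "source_ip"
    let user := pvGet e "username"
    let status := pvGet e "status"
    if !pvTruthy ip || !pvTruthy user || !pvTruthy status then passMFS fbs rest
    else if status == some "Failed" then
      let ipS := ip.getD ""
      passMFS (fbs.insert ipS (fbs.getD ipS 0 + 1)) rest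
    else if status == some "Accepted" then
      let ipS := ip.getD ""
      let f := fbs.getD ipS 0
      (if f ≥ 3 then [pvMsgMFS ipS (user.getD "") f] else []) ++ passMFS (fbs.insert ipS 0) rest
    else passMFS fbs rest

def passSudo : List (List (String × String)) → List String
  | [] => []
  | e :: rest =>
    if (!pvTruthy (pvGet e "source_ip") || !pvTruthy (pvGet e "username")
        || !pvTruthy (pvGet e "status"))
       && (pvGet e "event_type" == some "sudo" && pvTruthy (pvGet e "command")) then
      pvMsgSudo (pvFmt (pvGet e "username")) ((pvGet e "command").getD "")
          (pvFmt (pvGet e "timestamp")) :: passSudo rest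
    else passSudo rest

def authlog_detection_alt (logs : List (List (String × String))) : List (String × List String) :=
  [("Brute-Force SSH Attack", passBF .empty logs),
   ("Suspicious Login Times", passSusp logs),
   ("Logins from New or Rare IPs", passNew .empty logs),
   ("Multiple Failed Then Successful Login", passMFS .empty logs),
   ("Sudden Sudo Access", passSudo logs)]

-- ===== PRECONDITION & SPEC =====
-- Pre_ excludes exactly the inputs where Python A raises: a complete entry with status
-- "Accepted" whose timestamp is missing or whose hour int(timestamp.split(" ")[1].split(":")[0])
-- fails to parse (AttributeError/IndexError/ValueError).
def Pre_authlog_detection (logs : List (List (String × String))) : Prop :=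
  (logs.all (fun e =>
    !(pvTruthy (pvGet e "source_ip") && pvTruthy (pvGet e "username")
      && (pvGet e "status" == some "Accepted"))
    || ((pvGet e "timestamp").bind pvHour).isSome)) = true
instance (logs : List (List (String × String))) : Decidable (Pre_authlog_detection logs) := by
  unfold Pre_authlog_detection; infer_instance

def pvWitness_authlog_detection : (List (List (String × String))) :=
  [[("source_ip", "1.2.3.4"), ("username", "bob"), ("status", "Accepted"),
    ("timestamp", "2024-01-01 03:00:00")],
   [("source_ip", "1.2.3.4"), ("username", "bob"), ("status", "Failed")]]

def Spec_authlog_detection (logs : List (List (String × String))) (out : List (String × List String)) : Prop := out = authlog_detection_alt logs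
instance (logs : List (List (String × String))) (out : List (String × List String)) : Decidable (Spec_authlog_detection logs out) := by unfold Spec_authlog_detection; infer_instance

-- ===== CLAIM (what is proved, stated in full; the proofs are below) =====
def Claim_equal_authlog_detection : Prop := ∀ (logs : List (List (String × String))), Dom_authlog_detection logs → Pre_authlog_detection logs → Spec_authlog_detection logs (authlog_detection logs)

-- ===== LEMMAS AND PROOFS =====

lemma r1_fold (logs : List (List (String × String))) : ∀ (s : AuthStA),
    (logs.foldl authStepA s).r1 = s.r1 ++ passBF s.bf logs := by
  induction logs with
  | nil => intro s; simp [passBF]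
  | cons e rest ih =>
    intro s
    simp only [List.foldl_cons, ih]
    cases hG : (!pvTruthy (pvGet e "source_ip") || !pvTruthy (pvGet e "username")
        || !pvTruthy (pvGet e "status")) with
    | true =>
      cases hS : (pvGet e "event_type" == some "sudo" && pvTruthy (pvGet e "command")) <;>
        simp [authStepA, passBF, hG, hS]
    | false =>
      cases hF : (pvGet e "status" == some "Failed") with
      | true =>
        have hv : pvGet e "status" = some "Failed" := by
          cases hq : pvGet e "status" <;> simp_all
        have hA : (pvGet e "status" == some "Accepted") = false := by rw [hv]; decide
        simp only [authStepA, passBF, hG, hF, hA, Bool.false_eq_true, if_false, if_true]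
        split_ifs <;> simp_all
      | false =>
        cases hA : (pvGet e "status" == some "Accepted") with
        | true =>
          simp only [authStepA, passBF, hG, hF, hA, Bool.false_eq_true, if_false, if_true]
        | false =>
          simp [authStepA, passBF, hG, hF, hA]

lemma r2_fold (logs : List (List (String × String))) : ∀ (s : AuthStA),
    (logs.foldl authStepA s).r2 = s.r2 ++ passSusp logs := by
  induction logs with
  | nil => intro s; simp [passSusp]
  | cons e rest ih =>
    intro s
    simp only [List.foldl_cons, ih]
    cases hG : (!pvTruthy (pvGet e "source_ip") || !pvTruthy (pvGet e "username")
        || !pvTruthy (pvGet e "status")) with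
    | true =>
      cases hS : (pvGet e "event_type" == some "sudo" && pvTruthy (pvGet e "command")) <;>
        simp [authStepA, passSusp, hG, hS]
    | false =>
      cases hF : (pvGet e "status" == some "Failed") with
      | true =>
        have hv : pvGet e "status" = some "Failed" := by
          cases hq : pvGet e "status" <;> simp_all
        have hA : (pvGet e "status" == some "Accepted") = false := by rw [hv]; decide
        simp only [authStepA, passSusp, hG, hF, hA, Bool.false_eq_true, if_false, if_true]
      | false =>
        cases hA : (pvGet e "status" == some "Accepted") with
        | true =>
          simp only [authStepA, passSusp, hG, hF, hA, Bool.false_eq_true, if_false, if_true]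
          split_ifs <;> simp_all
        | false =>
          simp [authStepA, passSusp, hG, hF, hA]

lemma r3_fold (logs : List (List (String × String))) : ∀ (s : AuthStA),
    (logs.foldl authStepA s).r3 = s.r3 ++ passNew s.known logs := by
  induction logs with
  | nil => intro s; simp [passNew]
  | cons e rest ih =>
    intro s
    simp only [List.foldl_cons, ih]
    cases hG : (!pvTruthy (pvGet e "source_ip") || !pvTruthy (pvGet e "username")
        || !pvTruthy (pvGet e "status")) with
    | true =>
      cases hS : (pvGet e "event_type" == some "sudo" && pvTruthy (pvGet e "command")) <;>
        simp [authStepA, passNew, hG, hS]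
    | false =>
      cases hF : (pvGet e "status" == some "Failed") with
      | true =>
        have hv : pvGet e "status" = some "Failed" := by
          cases hq : pvGet e "status" <;> simp_all
        have hA : (pvGet e "status" == some "Accepted") = false := by rw [hv]; decide
        simp only [authStepA, passNew, hG, hF, hA, Bool.false_eq_true, if_false, if_true]
      | false =>
        cases hA : (pvGet e "status" == some "Accepted") with
        | true =>
          simp only [authStepA, passNew, hG, hF, hA, Bool.false_eq_true, if_false, if_true]
          split_ifs <;> simp_all
        | false =>
          simp [authStepA, passNew, hG, hF, hA]

lemma r4_fold (logs : List (List (String × String))) : ∀ (s : AuthStA),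
    (logs.foldl authStepA s).r4 = s.r4 ++ passMFS s.fbs logs := by
  induction logs with
  | nil => intro s; simp [passMFS]
  | cons e rest ih =>
    intro s
    simp only [List.foldl_cons, ih]
    cases hG : (!pvTruthy (pvGet e "source_ip") || !pvTruthy (pvGet e "username")
        || !pvTruthy (pvGet e "status")) with
    | true =>
      cases hS : (pvGet e "event_type" == some "sudo" && pvTruthy (pvGet e "command")) <;>
        simp [authStepA, passMFS, hG, hS]
    | false =>
      cases hF : (pvGet e "status" == some "Failed") with
      | true =>
        have hv : pvGet e "status" = some "Failed" := by
          cases hq : pvGet e "status" <;> simp_all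
        have hA : (pvGet e "status" == some "Accepted") = false := by rw [hv]; decide
        simp only [authStepA, passMFS, hG, hF, hA, Bool.false_eq_true, if_false, if_true]
      | false =>
        cases hA : (pvGet e "status" == some "Accepted") with
        | true =>
          simp only [authStepA, passMFS, hG, hF, hA, Bool.false_eq_true, if_false, if_true]
          split_ifs <;> simp_all
        | false =>
          simp [authStepA, passMFS, hG, hF, hA]

lemma r5_fold (logs : List (List (String × String))) : ∀ (s : AuthStA),
    (logs.foldl authStepA s).r5 = s.r5 ++ passSudo logs := by
  induction logs with
  | nil => intro s; simp [passSudo]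
  | cons e rest ih =>
    intro s
    simp only [List.foldl_cons, ih]
    cases hG : (!pvTruthy (pvGet e "source_ip") || !pvTruthy (pvGet e "username")
        || !pvTruthy (pvGet e "status")) with
    | true =>
      cases hS : (pvGet e "event_type" == some "sudo" && pvTruthy (pvGet e "command")) <;>
        simp [authStepA, passSudo, hG, hS]
    | false =>
      cases hF : (pvGet e "status" == some "Failed") with
      | true =>
        have hv : pvGet e "status" = some "Failed" := by
          cases hq : pvGet e "status" <;> simp_all
        have hA : (pvGet e "status" == some "Accepted") = false := by rw [hv]; decide
        simp only [authStepA, passSudo, hG, hF, hA, Bool.false_eq_true, if_false, if_true]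
        split_ifs <;> simp_all
      | false =>
        cases hA : (pvGet e "status" == some "Accepted") with
        | true =>
          simp only [authStepA, passSudo, hG, hF, hA, Bool.false_eq_true, if_false, if_true]
          split_ifs <;> simp_all
        | false =>
          simp [authStepA, passSudo, hG, hF, hA]

-- ===== VERDICT (by name: the statement is the Claim_ definition above) =====
theorem authlog_detection_spec : Claim_equal_authlog_detection := by
  intro logs _ _
  unfold Spec_authlog_detection authlog_detection authlog_detection_alt
  simp only [r1_fold, r2_fold, r3_fold, r4_fold, r5_fold]
  rfl
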